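-- pv_equiv track=rewrite | github.com/navadimml/chitta-advanced | backend/tests/test_temporal_xray.py | _extract_chitta_question
-- ===== SOURCE A (Python) =====
-- def _extract_chitta_question(chitta_response: str) -> str:
--     """Extract the main question Chitta asked from the response.
--
--     Chitta's responses typically end with a question that guides the parent.
--     This extracts that guiding question for the timeline.
--     """
--     if not chitta_response:
--         return "—"
--
--     # Find the last question mark and extract that sentence
--     response = chitta_response.strip()
--
--     # Look for questions (ending with ?)
--     sentences = response.replace('?', '?\n').split('\n')
--     questions = [s.strip() for s in sentences if s.strip().endswith('?')]
--
--     if questions: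
--         # Take the last question (the one that guides parent's next response)
--         question = questions[-1]
--         # Truncate for display
--         if len(question) > 35:
--             return question[:32] + "..."
--         return question
--
--     # No question found - summarize what Chitta said
--     if len(response) > 35:
--         return response[:32] + "..."
--     return response
-- ===== SOURCE B (Python) =====
-- def _extract_chitta_question(chitta_response: str) -> str:
--     """Single forward state-machine pass: track the last finished question
--     segment instead of building the replace/split sentence lists."""
--     if not chitta_response:
--         return "—"
--
--     response = chitta_response.strip()
--
--     best = None
--     cur = []
--     for c in response:
--         if c == '?':
--             # a '?' always closes the current segment as a question
--             best = ''.join(cur).lstrip() + '?'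
--             cur = []
--         elif c == '\n':
--             cur = []
--         else:
--             cur.append(c)
--
--     if best is not None:
--         if len(best) > 35:
--             return best[:32] + "..."
--         return best
--
--     if len(response) > 35:
--         return response[:32] + "..."
--     return response
-- ===== Notes on version B (the rewrite author's own statement) =====
-- stated objective: alternative
-- what changed: Replaces A's replace('?','?\n')/split('\n')/strip-filter sentence-list pipeline by a single forward state-machine pass over the characters that keeps only the current segment and the last finished question.
import Mathlib
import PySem

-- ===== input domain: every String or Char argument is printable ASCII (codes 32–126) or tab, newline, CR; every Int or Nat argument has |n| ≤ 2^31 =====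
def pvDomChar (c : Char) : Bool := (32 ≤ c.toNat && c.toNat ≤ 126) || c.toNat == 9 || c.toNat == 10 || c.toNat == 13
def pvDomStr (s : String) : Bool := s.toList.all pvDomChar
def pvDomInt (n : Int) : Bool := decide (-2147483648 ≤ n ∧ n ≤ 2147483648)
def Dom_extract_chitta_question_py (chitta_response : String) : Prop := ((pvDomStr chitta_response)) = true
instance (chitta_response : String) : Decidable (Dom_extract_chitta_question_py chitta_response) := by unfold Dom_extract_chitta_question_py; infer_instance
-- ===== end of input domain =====

-- B replaces A's replace('?','?\n')/split('\n')/filter sentence pipeline by a single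
-- forward state-machine pass that keeps only the last finished question segment (objective: alternative).

-- ===== PORT A =====
def extract_chitta_question_py (chitta_response : String) : String :=
  if chitta_response = "" then "—"
  else
    let response := PySem.Str.strip chitta_response
    -- sep "\n" is nonempty, so split? is always `some`; the getD [] default is unreachable
    let sentences := (PySem.Str.split? (PySem.Str.replace response "?" "?\n") "\n").getD []
    -- [s.strip() for s in sentences if s.strip().endswith('?')]
    let questions := (sentences.filter
        (fun s => PySem.Str.endswith (PySem.Str.strip s) "?")).map PySem.Str.strip
    if questions ≠ [] then
      -- questions[-1]; the list is nonempty here, so the getD "" default is unreachable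
      let question := (PySem.List.pyGet? questions (-1)).getD ""
      if PySem.Str.len question > 35 then
        String.ofList ((PySem.Str.slice question none (some 32)).toList ++ "...".toList)
      else question
    else
      if PySem.Str.len response > 35 then
        String.ofList ((PySem.Str.slice response none (some 32)).toList ++ "...".toList)
      else response

-- ===== PORT B =====
def extract_chitta_question_py_alt (chitta_response : String) : String :=
  if chitta_response = "" then "—"
  else
    let response := PySem.Str.strip chitta_response
    -- for c in response: the state is (cur, best)
    let st := response.toList.foldl
      (fun (s : List Char × Option (List Char)) c =>
        if c = '?' then ([], some (PySem.Chars.lstrip s.1 ++ ['?']))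
        else if c = '\n' then ([], s.2)
        else (s.1 ++ [c], s.2))
      ([], none)
    match st.2 with
    | some best =>
        if ((PySem.Chars.len best : Int) > 35) then
          String.ofList (PySem.Chars.slice best none (some 32) ++ "...".toList)
        else String.ofList best
    | none =>
        if PySem.Str.len response > 35 then
          String.ofList ((PySem.Str.slice response none (some 32)).toList ++ "...".toList)
        else response

-- ===== PRECONDITION & SPEC =====
def Spec_extract_chitta_question_py (chitta_response : String) (out : String) : Prop := out = extract_chitta_question_py_alt chitta_response
instance (chitta_response : String) (out : String) : Decidable (Spec_extract_chitta_question_py chitta_response out) := by unfold Spec_extract_chitta_question_py; infer_instance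

-- ===== CLAIM (what is proved, stated in full; the proofs are below) =====
def Claim_equal_extract_chitta_question_py : Prop := ∀ (chitta_response : String), Dom_extract_chitta_question_py chitta_response → Spec_extract_chitta_question_py chitta_response (extract_chitta_question_py chitta_response)

-- ===== LEMMAS AND PROOFS =====

def pvConsHead (x : List Char) (l : List (List Char)) : List (List Char) :=
  match l with
  | [] => [x]
  | h :: t => (x ++ h) :: t

def pvRep : List Char → List Char
  | [] => []
  | c :: t => if c = '?' then '?' :: '\n' :: pvRep t else c :: pvRep t

def pvNlSplit : List Char → List (List Char)
  | [] => [[]]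
  | c :: t => if c = '\n' then [] :: pvNlSplit t else pvConsHead [c] (pvNlSplit t)

def pvSegs : List Char → List (List Char)
  | [] => [[]]
  | c :: t =>
      if c = '?' then ['?'] :: pvSegs t
      else if c = '\n' then [] :: pvSegs t
      else pvConsHead [c] (pvSegs t)

lemma pvConsHead_ne_nil (x : List Char) (l : List (List Char)) : pvConsHead x l ≠ [] := by
  cases l <;> simp [pvConsHead]

lemma pvNlSplit_ne_nil (s : List Char) : pvNlSplit s ≠ [] := by
  cases s with
  | nil => simp [pvNlSplit]
  | cons c t =>
    simp only [pvNlSplit]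
    split
    · simp
    · exact pvConsHead_ne_nil _ _

lemma pvSegs_ne_nil (s : List Char) : pvSegs s ≠ [] := by
  cases s with
  | nil => simp [pvSegs]
  | cons c t =>
    simp only [pvSegs]
    split
    · simp
    · split
      · simp
      · exact pvConsHead_ne_nil _ _

lemma pvConsHead_append (x y : List Char) (l : List (List Char)) :
    pvConsHead (x ++ y) l = pvConsHead x (pvConsHead y l) := by
  cases l <;> simp [pvConsHead]

lemma pvSegs_clean_append (cur : List Char) : ∀ (cs : List Char),
    '?' ∉ cur → '\n' ∉ cur →
    pvSegs (cur ++ cs) = pvConsHead cur (pvSegs cs) := by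
  induction cur with
  | nil =>
    intro cs _ _
    cases hs : pvSegs cs with
    | nil => exact absurd hs (pvSegs_ne_nil cs)
    | cons a b => simp [pvConsHead, hs]
  | cons c t ih =>
    intro cs h1 h2
    simp only [List.mem_cons, not_or] at h1 h2
    have hstep : pvSegs (c :: (t ++ cs)) = pvConsHead [c] (pvSegs (t ++ cs)) := by
      simp only [pvSegs]
      rw [if_neg (fun h => h1.1 h.symm), if_neg (fun h => h2.1 h.symm)]
    rw [List.cons_append, hstep, ih cs h1.2 h2.2, ← pvConsHead_append]
    rfl

lemma pvMem_strip {a : Char} {s : List Char} (h : a ∈ PySem.Chars.strip s) : a ∈ s := by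
  simp only [PySem.Chars.strip, PySem.Chars.rstrip, PySem.Chars.lstrip, List.mem_reverse] at h
  have h2 := (List.dropWhile_sublist _).mem h
  rw [List.mem_reverse] at h2
  exact (List.dropWhile_sublist _).mem h2

lemma pvStrip_append_q (zs : List Char) :
    PySem.Chars.strip (zs ++ ['?']) = PySem.Chars.lstrip zs ++ ['?'] := by
  have hq : PySem.Chars.isspace '?' = false := by decide
  have h1 : PySem.Chars.lstrip (zs ++ ['?']) = PySem.Chars.lstrip zs ++ ['?'] := by
    simp only [PySem.Chars.lstrip, List.dropWhile_append]
    split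
    · next hemp =>
        rw [List.isEmpty_iff] at hemp
        simp [List.dropWhile, hq, hemp]
    · rfl
  rw [PySem.Chars.strip, h1, PySem.Chars.rstrip]
  simp [hq]

lemma pvQ_clean_false (s : List Char) (h : '?' ∉ s) :
    PySem.Chars.endswith (PySem.Chars.strip s) ['?'] = false := by
  by_contra hb
  rw [Bool.not_eq_false, PySem.Chars.endswith_iff] at hb
  exact h (pvMem_strip (hb.mem (by simp)))

lemma pvEndswith_q (w : List Char) :
    PySem.Chars.endswith (w ++ ['?']) ['?'] = true := by
  rw [PySem.Chars.endswith_iff]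
  exact List.suffix_append w ['?']

lemma pvGetLast?_cons {α : Type} (a : α) (l : List α) :
    (a :: l).getLast? = l.getLast?.or (some a) := by
  cases l with
  | nil => rfl
  | cons b t =>
    rw [List.getLast?_cons_cons]
    cases h : (b :: t).getLast? with
    | none => simp [List.getLast?_eq_none_iff] at h
    | some x => rfl

lemma pvRep_go (l : List Char) : ∀ (acc : List Char) (fuel : Nat), l.length ≤ fuel →
    PySem.Chars.replace.go ['?'] ['?', '\n'] fuel l acc = acc.reverse ++ pvRep l := by
  induction l with
  | nil =>
    intro acc fuel _
    cases fuel <;> simp [PySem.Chars.replace.go, pvRep]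
  | cons c t ih =>
    intro acc fuel h
    cases fuel with
    | zero => simp at h
    | succ f =>
      rw [PySem.Chars.replace.go]
      simp only [List.length_cons, Nat.add_le_add_iff_right] at h
      by_cases hc : c = '?'
      · subst hc
        simp only [List.isPrefixOf, Bool.and_eq_true, beq_self_eq_true, if_true, true_and,
          List.length_cons, List.length_nil, List.drop_succ_cons,
          List.drop_zero, List.reverse_cons, List.reverse_nil, List.nil_append, List.append_assoc]
        rw [ih _ f h]
        simp [pvRep]
      · have hpre : List.isPrefixOf ['?'] (c :: t) = false := by
          simp only [List.isPrefixOf, Bool.and_true]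
          simp only [beq_eq_false_iff_ne, ne_eq]
          exact fun h' => hc h'.symm
        rw [hpre]
        simp only [Bool.false_eq_true, if_false]
        rw [ih _ f h]
        simp [pvRep, hc]

lemma pvRep_eq (s : List Char) :
    PySem.Chars.replace s ['?'] ['?', '\n'] = pvRep s := by
  rw [PySem.Chars.replace]
  simp only [List.isEmpty_cons, Bool.false_eq_true, if_false]
  exact pvRep_go s [] s.length (le_refl _)

lemma pvNlSplit_go (l : List Char) : ∀ (cur : List Char) (acc : List (List Char)) (fuel : Nat),
    l.length < fuel →
    PySem.Chars.splitOn.go ['\n'] fuel l cur acc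
      = acc.reverse ++ pvConsHead cur.reverse (pvNlSplit l) := by
  induction l with
  | nil =>
    intro cur acc fuel h
    cases fuel with
    | zero => simp at h
    | succ f => simp [PySem.Chars.splitOn.go, pvNlSplit, pvConsHead]
  | cons c t ih =>
    intro cur acc fuel h
    cases fuel with
    | zero => simp at h
    | succ f =>
      rw [PySem.Chars.splitOn.go]
      simp only [List.length_cons, Nat.add_lt_add_iff_right] at h
      by_cases hc : c = '\n'
      · subst hc
        simp only [List.isPrefixOf, Bool.and_eq_true, beq_self_eq_true, if_true, true_and,
          List.length_cons, List.length_nil, List.drop_succ_cons,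
          List.drop_zero]
        rw [ih _ _ f h]
        cases hs : pvNlSplit t with
        | nil => exact absurd hs (pvNlSplit_ne_nil t)
        | cons a b => simp [pvNlSplit, pvConsHead, hs]
      · have hpre : List.isPrefixOf ['\n'] (c :: t) = false := by
          simp only [List.isPrefixOf, Bool.and_true]
          simp only [beq_eq_false_iff_ne, ne_eq]
          exact fun h' => hc h'.symm
        rw [hpre]
        simp only [Bool.false_eq_true, if_false]
        rw [ih _ _ f h]
        cases hs : pvNlSplit t with
        | nil => exact absurd hs (pvNlSplit_ne_nil t)
        | cons a b => simp [pvNlSplit, pvConsHead, hs, hc]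

lemma pvNlSplit_eq (s : List Char) :
    PySem.Chars.splitOn s ['\n'] = pvNlSplit s := by
  rw [PySem.Chars.splitOn]
  rw [pvNlSplit_go s [] [] (s.length + 1) (by omega)]
  cases hs : pvNlSplit s with
  | nil => exact absurd hs (pvNlSplit_ne_nil s)
  | cons a b => simp [pvConsHead]

lemma pvNlSplit_pvRep (cs : List Char) : pvNlSplit (pvRep cs) = pvSegs cs := by
  induction cs with
  | nil => simp [pvRep, pvNlSplit, pvSegs]
  | cons c t ih =>
    by_cases hc : c = '?'
    · subst hc
      simp [pvRep, pvNlSplit, pvSegs, ih, pvConsHead]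
    · by_cases hn : c = '\n'
      · subst hn
        simp [pvRep, pvNlSplit, pvSegs, ih]
      · simp [pvRep, pvNlSplit, pvSegs, ih, hc, hn]

lemma pvPyGet_neg_one {α : Type} (l : List α) (h : l ≠ []) :
    PySem.List.pyGet? l (-1) = l.getLast? := by
  have hl : 1 ≤ l.length := List.length_pos_iff.mpr h
  have hc : -(l.length : Int) ≤ -1 := by omega
  have hneg : ¬ (0:Int) ≤ -1 := by omega
  rw [PySem.List.pyGet?, PySem.List.pyIdx?, if_neg hneg, if_pos hc]
  have h1 : (-(-1:Int)).toNat = 1 := by rfl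
  rw [h1]
  show l[l.length - 1]? = l.getLast?
  rw [List.getLast?_eq_getElem?]

lemma pvFold_spec (cs : List Char) : ∀ (cur : List Char) (best : Option (List Char)),
    '?' ∉ cur → '\n' ∉ cur →
    (cs.foldl
      (fun (s : List Char × Option (List Char)) c =>
        if c = '?' then ([], some (PySem.Chars.lstrip s.1 ++ ['?']))
        else if c = '\n' then ([], s.2)
        else (s.1 ++ [c], s.2))
      (cur, best)).2
    = ((((pvSegs (cur ++ cs)).filter
          (fun s => PySem.Chars.endswith (PySem.Chars.strip s) ['?'])).map
            PySem.Chars.strip).getLast?).or best := by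
  induction cs with
  | nil =>
    intro cur best h1 h2
    rw [List.foldl_nil, pvSegs_clean_append cur [] h1 h2]
    show best = _
    simp [pvSegs, pvConsHead, List.filter, pvQ_clean_false cur h1]
  | cons c t ih =>
    intro cur best h1 h2
    rw [List.foldl_cons]
    dsimp only
    by_cases hc : c = '?'
    · subst hc
      rw [if_pos rfl]
      rw [ih [] (some (PySem.Chars.lstrip cur ++ ['?'])) (by simp) (by simp)]
      simp only [List.nil_append]
      have hseg : pvSegs (cur ++ '?' :: t) = (cur ++ ['?']) :: pvSegs t := by
        rw [pvSegs_clean_append cur _ h1 h2]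
        simp [pvSegs, pvConsHead]
      rw [hseg]
      rw [List.filter_cons_of_pos (by rw [pvStrip_append_q]; exact pvEndswith_q _)]
      rw [List.map_cons, pvGetLast?_cons, pvStrip_append_q]
      rw [Option.or_assoc]
      rfl
    · by_cases hn : c = '\n'
      · subst hn
        rw [if_neg hc, if_pos rfl]
        rw [ih [] best (by simp) (by simp)]
        simp only [List.nil_append]
        have hseg : pvSegs (cur ++ '\n' :: t) = cur :: pvSegs t := by
          rw [pvSegs_clean_append cur _ h1 h2]
          cases hs : pvSegs t with
          | nil => exact absurd hs (pvSegs_ne_nil t)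
          | cons a b => simp [pvSegs, pvConsHead, hs]
        rw [hseg]
        rw [List.filter_cons_of_neg (by simp [pvQ_clean_false cur h1])]
      · rw [if_neg hc, if_neg hn]
        have h1' : '?' ∉ cur ++ [c] := by
          simp only [List.mem_append, List.mem_singleton, not_or]
          exact ⟨h1, fun h => hc h.symm⟩
        have h2' : '\n' ∉ cur ++ [c] := by
          simp only [List.mem_append, List.mem_singleton, not_or]
          exact ⟨h2, fun h => hn h.symm⟩
        rw [ih (cur ++ [c]) best h1' h2']
        rw [← List.append_cons]

-- ===== VERDICT (by name: the statement is the Claim_ definition above) =====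
theorem extract_chitta_question_py_spec : Claim_equal_extract_chitta_question_py := by
  unfold Claim_equal_extract_chitta_question_py
  intro s _
  unfold Spec_extract_chitta_question_py
  simp only [extract_chitta_question_py, extract_chitta_question_py_alt]
  by_cases hs : s = ""
  · rw [if_pos hs, if_pos hs]
  · rw [if_neg hs, if_neg hs]
    have hofList : ∀ cs : List Char, (String.ofList cs).toList = cs := by
      intro cs; simp
    have hrep : (PySem.Str.replace (PySem.Str.strip s) "?" "?\n").toList
        = pvRep (PySem.Str.strip s).toList := by
      rw [PySem.Str.toList_replace]
      have h1 : ("?" : String).toList = ['?'] := rfl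
      have h2 : ("?\n" : String).toList = ['?', '\n'] := rfl
      rw [h1, h2, pvRep_eq]
    have hsplit : PySem.Str.split? (PySem.Str.replace (PySem.Str.strip s) "?" "?\n") "\n"
        = some ((pvSegs (PySem.Str.strip s).toList).map String.ofList) := by
      rw [PySem.Str.split?, hrep]
      have hsep : ("\n" : String).toList = ['\n'] := rfl
      rw [hsep, PySem.Chars.split?]
      simp only [List.isEmpty_cons, Bool.false_eq_true, if_false]
      rw [pvNlSplit_eq, pvNlSplit_pvRep]
      rfl
    rw [hsplit]
    have hquestions :
        (((pvSegs (PySem.Str.strip s).toList).map String.ofList).filter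
            (fun t => PySem.Str.endswith (PySem.Str.strip t) "?")).map PySem.Str.strip
        = (((pvSegs (PySem.Str.strip s).toList).filter
            (fun cs => PySem.Chars.endswith (PySem.Chars.strip cs) ['?'])).map
              PySem.Chars.strip).map String.ofList := by
      rw [List.filter_map]
      have hp : ((fun t => PySem.Str.endswith (PySem.Str.strip t) "?") ∘ String.ofList)
          = (fun cs => PySem.Chars.endswith (PySem.Chars.strip cs) ['?']) := by
        funext cs
        simp only [Function.comp_apply, PySem.Str.endswith_eq, PySem.Str.toList_strip, hofList]
      rw [hp, List.map_map, List.map_map]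
      apply List.map_congr_left
      intro cs _
      simp only [Function.comp_apply, PySem.Str.strip]
      rw [hofList]
    rw [Option.getD_some, hquestions]
    rw [pvFold_spec (PySem.Str.strip s).toList [] none (by simp) (by simp)]
    simp only [List.nil_append, Option.or_none]
    cases hlast : (((pvSegs (PySem.Str.strip s).toList).filter
        (fun cs => PySem.Chars.endswith (PySem.Chars.strip cs) ['?'])).map
          PySem.Chars.strip).getLast? with
    | none =>
      have hnil := List.getLast?_eq_none_iff.mp hlast
      rw [hnil]
      simp
    | some b =>
      have hne : (((pvSegs (PySem.Str.strip s).toList).filter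
          (fun cs => PySem.Chars.endswith (PySem.Chars.strip cs) ['?'])).map
            PySem.Chars.strip) ≠ [] := by
        intro h
        rw [h] at hlast
        simp at hlast
      have hne2 : ((((pvSegs (PySem.Str.strip s).toList).filter
          (fun cs => PySem.Chars.endswith (PySem.Chars.strip cs) ['?'])).map
            PySem.Chars.strip).map String.ofList) ≠ [] :=
        fun h => hne (List.map_eq_nil_iff.mp h)
      rw [if_pos hne2]
      rw [pvPyGet_neg_one _ hne2]
      rw [List.getLast?_map, hlast, Option.map_some, Option.getD_some]
      dsimp only
      have hlen : PySem.Str.len (String.ofList b) = (PySem.Chars.len b : Int) := by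
        rw [PySem.Str.len, hofList, PySem.Chars.len_eq]
      rw [hlen]
      by_cases hb : (PySem.Chars.len b : Int) > 35
      · rw [if_pos hb, if_pos hb]
        rw [PySem.Str.toList_slice, hofList]
      · rw [if_neg hb, if_neg hb]
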